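-- pv_equiv track=rewrite | github.com/KEUMIN/algorithm_2024 | tests/travel_desert_island.py | solution
-- ===== SOURCE A (Python) =====
-- from collections import deque
--
-- def solution(maps):
--     row = len(maps)
--     col = len(maps[0])
--
--     d = [(1,0),(0,-1),(-1,0),(0,1)]
--     visit = [[False]*col for _ in range(row)]
--     q = deque()
--
--     def isValid(i, j, r, c):
--         if 0 <= i < r and 0 <= j < c:
--             if not visit[i][j] and maps[i][j] != 'X':
--                 return True
--             else:
--                 return False
--         else:
--             return False
--
--     def bfs(i, j, r, c):
--         q.append((i, j))
--         visit[i][j] = True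
--         sum = int(maps[i][j])
--
--         while q:
--             cx, cy = q.popleft()
--             for dx, dy in d:
--                 if isValid(cx+dx, cy+dy, r, c):
--                     visit[cx+dx][cy+dy] = True
--                     q.append((cx+dx, cy+dy))
--                     sum += int(maps[cx+dx][cy+dy])
--
--         return sum
--
--     answer = []
--     for i in range(row):
--         for j in range(col):
--             if isValid(i, j, row, col):
--                 answer.append(bfs(i, j, row, col))
--
--     answer.sort()
--
--     return answer if len(answer) > 0 else [-1]
-- ===== SOURCE B (Python) =====
-- def solution(maps):
--     row, col = len(maps), len(maps[0])
--     visit = [[False] * col for _ in range(row)]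
--
--     def flood(i, j):
--         visit[i][j] = True
--         total = int(maps[i][j])
--         for di, dj in ((1, 0), (0, -1), (-1, 0), (0, 1)):
--             ni, nj = i + di, j + dj
--             if 0 <= ni < row and 0 <= nj < col and not visit[ni][nj] and maps[ni][nj] != 'X':
--                 total += flood(ni, nj)
--         return total
--
--     answer = sorted(
--         flood(i, j)
--         for i in range(row)
--         for j in range(col)
--         if not visit[i][j] and maps[i][j] != 'X'
--     )
--     return answer if answer else [-1]
-- ===== Notes on version B (the rewrite author's own statement) =====
-- stated objective: alternative
-- what changed: Queue-based BFS with an explicit deque and marking-on-enqueue is replaced by a recursive flood-fill (DFS) that returns each island's sum directly, with the sorted answer built in one comprehension.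
import Mathlib
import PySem

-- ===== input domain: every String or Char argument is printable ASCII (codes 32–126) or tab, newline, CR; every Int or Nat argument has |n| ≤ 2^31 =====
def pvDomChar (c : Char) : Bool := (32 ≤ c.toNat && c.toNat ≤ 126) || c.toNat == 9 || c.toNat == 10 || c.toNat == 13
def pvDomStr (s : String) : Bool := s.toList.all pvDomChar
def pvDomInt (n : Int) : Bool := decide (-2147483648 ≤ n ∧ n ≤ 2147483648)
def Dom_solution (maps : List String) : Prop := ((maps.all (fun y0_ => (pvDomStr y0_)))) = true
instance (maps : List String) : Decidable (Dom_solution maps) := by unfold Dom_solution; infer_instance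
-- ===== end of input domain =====

-- B replaces A's deque-based BFS (mark-on-enqueue, running sum mutated in the loop) by a
-- recursive flood-fill that returns each island's sum; equivalence of the return values is
-- proved (both mutate only function-local state, so there are no observable side effects).

abbrev Cell := Int × Int

-- the direction list d (identical in both Pythons)
def dirs4 : List Cell := [(1, 0), (0, -1), (-1, 0), (0, 1)]

-- maps[i][j] for 0 ≤ i < len(maps), 0 ≤ j < len(maps[0]) (both Pythons index only after a bounds check)
def cellAt (maps : List String) (i j : Int) : Char :=
  (maps.getD i.toNat "").toList.getD j.toNat ' '

-- int(maps[i][j]) for a one-digit cell (Pre_ guarantees digits; Python raises ValueError otherwise)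
def cellVal (maps : List String) (i j : Int) : Int := ((cellAt maps i j).toNat : Int) - 48

-- the isValid test shared verbatim by both Pythons: in bounds, unvisited, not 'X'
def validCell (maps : List String) (visit : List Cell) (i j : Int) : Bool :=
  decide (0 ≤ i ∧ i < (maps.length : Int) ∧ 0 ≤ j ∧ j < ((maps.headD "").length : Int) ∧
    (i, j) ∉ visit ∧ cellAt maps i j ≠ 'X')

-- ===== PORT A =====

-- body of A's 'for dx, dy in d' loop: append to q, mark visited, add to sum
def bfsStep (maps : List String) (cx cy : Int) (st : List Cell × List Cell × Int) (dv : Cell) :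
    List Cell × List Cell × Int :=
  if validCell maps st.2.1 (cx + dv.1) (cy + dv.2) then
    (st.1 ++ [(cx + dv.1, cy + dv.2)], (cx + dv.1, cy + dv.2) :: st.2.1,
      st.2.2 + cellVal maps (cx + dv.1) (cy + dv.2))
  else st

-- A's 'while q' loop; fuel bounds the number of pops (gridFuel is proved sufficient)
def bfsLoop (maps : List String) : Nat → List Cell → List Cell → Int → List Cell × Int
  | 0, _, visit, s => (visit, s)
  | _ + 1, [], visit, s => (visit, s)
  | fuel + 1, c :: qrest, visit, s =>
    let st := dirs4.foldl (bfsStep maps c.1 c.2) (qrest, visit, s)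
    bfsLoop maps fuel st.1 st.2.1 st.2.2

def gridFuel (maps : List String) : Nat := maps.length * (maps.headD "").length + 1

-- A's bfs(i, j, r, c)
def bfsA (maps : List String) (i j : Int) (visit : List Cell) : List Cell × Int :=
  bfsLoop maps (gridFuel maps) [(i, j)] ((i, j) :: visit) (cellVal maps i j)

def solution (maps : List String) : List Int :=
  let res := (PySem.List.pyRange 0 (maps.length : Int) 1).foldl (fun st i =>
      (PySem.List.pyRange 0 ((maps.headD "").length : Int) 1).foldl
        (fun (st : List Cell × List Int) j =>
          if validCell maps st.1 i j then
            let r := bfsA maps i j st.1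
            (r.1, st.2 ++ [r.2])
          else st) st) ([], [])
  let answer := PySem.List.sorted res.2 (fun x => x) false
  if answer.length > 0 then answer else [-1]

-- ===== PORT B =====

-- B's recursive flood(i, j): mark, take the cell's value, recurse into each valid neighbour
def floodB (maps : List String) : Nat → Int → Int → List Cell → List Cell × Int
  | 0, _, _, visit => (visit, 0)
  | fuel + 1, i, j, visit =>
    dirs4.foldl (fun (st : List Cell × Int) dv =>
      if validCell maps st.1 (i + dv.1) (j + dv.2) then
        let r := floodB maps fuel (i + dv.1) (j + dv.2) st.1
        (r.1, st.2 + r.2)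
      else st) ((i, j) :: visit, cellVal maps i j)

def solution_alt (maps : List String) : List Int :=
  let res := (PySem.List.pyRange 0 (maps.length : Int) 1).foldl (fun st i =>
      (PySem.List.pyRange 0 ((maps.headD "").length : Int) 1).foldl
        (fun (st : List Cell × List Int) j =>
          if !(decide ((i, j) ∈ st.1)) && decide (cellAt maps i j ≠ 'X') then
            let r := floodB maps (gridFuel maps) i j st.1
            (r.1, st.2 ++ [r.2])
          else st) st) ([], [])
  let answer := PySem.List.sorted res.2 (fun x => x) false
  if answer ≠ [] then answer else [-1]

-- ===== PRECONDITION & SPEC =====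

-- Pre_ excludes exactly the inputs where Python A raises: the empty list (maps[0] → IndexError),
-- a row shorter than the first row (maps[i][j] → IndexError), and any cell in the first
-- len(maps[0]) columns that is neither 'X' nor a digit (int(maps[i][j]) → ValueError);
-- characters beyond column len(maps[0]) are never read by A.
def Pre_solution (maps : List String) : Prop :=
  maps ≠ [] ∧ (maps.all (fun s =>
    decide ((maps.headD "").toList.length ≤ s.toList.length) &&
    (s.toList.take (maps.headD "").toList.length).all
      (fun ch => ch == 'X' || ch.isDigit))) = true

instance (maps : List String) : Decidable (Pre_solution maps) := by
  unfold Pre_solution; infer_instance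

def pvWitness_solution : List String := ["12X", "X3X"]

def Spec_solution (maps : List String) (out : List Int) : Prop := out = solution_alt maps
instance (maps : List String) (out : List Int) : Decidable (Spec_solution maps out) := by
  unfold Spec_solution; infer_instance

-- ===== CLAIM (what is proved, stated in full; the proofs are below) =====
def Claim_equal_solution : Prop :=
  ∀ (maps : List String), Dom_solution maps → Pre_solution maps → Spec_solution maps (solution maps)

-- ===== LEMMAS AND PROOFS =====

-- basic facts about validCell ------------------------------------------------

lemma validCell_iff (maps : List String) (visit : List Cell) (i j : Int) :
    validCell maps visit i j = true ↔
      (0 ≤ i ∧ i < (maps.length : Int) ∧ 0 ≤ j ∧ j < ((maps.headD "").length : Int) ∧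
        (i, j) ∉ visit ∧ cellAt maps i j ≠ 'X') := by
  simp [validCell]

lemma validCell_sub (maps : List String) {V W : List Cell} (hsub : ∀ x ∈ V, x ∈ W) {i j : Int}
    (h : validCell maps W i j = true) : validCell maps V i j = true := by
  rw [validCell_iff] at h ⊢
  exact ⟨h.1, h.2.1, h.2.2.1, h.2.2.2.1, fun hm => h.2.2.2.2.1 (hsub _ hm), h.2.2.2.2.2⟩

lemma validCell_false_sub (maps : List String) {V W : List Cell} (hsub : ∀ x ∈ V, x ∈ W)
    {i j : Int} (h : validCell maps V i j = false) : validCell maps W i j = false := by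
  cases hW : validCell maps W i j with
  | false => rfl
  | true => simp [validCell_sub maps hsub hW] at h

lemma validCell_not_mem (maps : List String) {V : List Cell} {i j : Int}
    (h : validCell maps V i j = true) : (i, j) ∉ V := by
  rw [validCell_iff] at h; exact h.2.2.2.2.1

lemma validCell_static (maps : List String) {V : List Cell} {i j : Int}
    (h : validCell maps V i j = true) : validCell maps [] i j = true := by
  rw [validCell_iff] at h ⊢
  exact ⟨h.1, h.2.1, h.2.2.1, h.2.2.2.1, by simp, h.2.2.2.2.2⟩

lemma validCell_of_static (maps : List String) {V : List Cell} {i j : Int}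
    (h : validCell maps [] i j = true) (hm : (i, j) ∉ V) : validCell maps V i j = true := by
  rw [validCell_iff] at h ⊢
  exact ⟨h.1, h.2.1, h.2.2.1, h.2.2.2.1, hm, h.2.2.2.2.2⟩

lemma validCell_false_of_mem (maps : List String) {V : List Cell} {i j : Int}
    (hm : (i, j) ∈ V) : validCell maps V i j = false := by
  cases h : validCell maps V i j with
  | false => rfl
  | true => exact absurd hm (validCell_not_mem maps h)

lemma validCell_resolve (maps : List String) {V W : List Cell} (_hsub : ∀ x ∈ V, x ∈ W)
    {i j : Int} (ht : validCell maps V i j = true) (hf : validCell maps W i j = false) :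
    (i, j) ∈ W := by
  by_contra hm
  rw [validCell_of_static maps (validCell_static maps ht) hm] at hf
  exact absurd hf (by simp)

lemma validCell_congr (maps : List String) {V W : List Cell} (h : ∀ x, x ∈ V ↔ x ∈ W)
    (i j : Int) : validCell maps V i j = validCell maps W i j := by
  simp only [validCell, (h (i, j))]

-- the grid and the unvisited-cell measure ------------------------------------

def gridL (maps : List String) : List Cell :=
  (PySem.List.pyRange 0 (maps.length : Int) 1).flatMap
    (fun i => (PySem.List.pyRange 0 ((maps.headD "").length : Int) 1).map (fun j => (i, j)))

lemma mem_gridL (maps : List String) {p : Cell} (h : validCell maps [] p.1 p.2 = true) :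
    p ∈ gridL maps := by
  rw [validCell_iff] at h
  simp only [gridL, List.mem_flatMap, List.mem_map, PySem.List.mem_pyRange_one]
  exact ⟨p.1, ⟨h.1, h.2.1⟩, p.2, ⟨h.2.2.1, h.2.2.2.1⟩, rfl⟩

lemma length_gridL (maps : List String) :
    (gridL maps).length = maps.length * (maps.headD "").length := by
  simp [gridL, List.length_flatMap, PySem.List.length_pyRange_one]

def unv (maps : List String) (visit : List Cell) : Nat :=
  ((gridL maps).toFinset \ visit.toFinset).card

lemma unv_le_total (maps : List String) (visit : List Cell) :
    unv maps visit ≤ maps.length * (maps.headD "").length := by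
  calc unv maps visit ≤ (gridL maps).toFinset.card :=
        Finset.card_le_card (Finset.sdiff_subset)
    _ ≤ (gridL maps).length := (gridL maps).toFinset_card_le
    _ = _ := length_gridL maps

lemma unv_anti (maps : List String) {V W : List Cell} (hsub : ∀ x ∈ V, x ∈ W) :
    unv maps W ≤ unv maps V := by
  apply Finset.card_le_card
  intro x hx
  rw [Finset.mem_sdiff] at hx ⊢
  exact ⟨hx.1, fun hm => hx.2 (by rw [List.mem_toFinset] at hm ⊢; exact hsub _ hm)⟩

lemma unv_cons_lt (maps : List String) {visit : List Cell} {p : Cell}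
    (hok : validCell maps [] p.1 p.2 = true) (hm : p ∉ visit) :
    unv maps (p :: visit) < unv maps visit := by
  have hp : p ∈ (gridL maps).toFinset \ visit.toFinset := by
    rw [Finset.mem_sdiff, List.mem_toFinset, List.mem_toFinset]
    exact ⟨mem_gridL maps hok, hm⟩
  apply Finset.card_lt_card
  constructor
  · intro x hx
    rw [Finset.mem_sdiff, List.mem_toFinset, List.mem_toFinset, List.mem_cons] at hx
    rw [Finset.mem_sdiff, List.mem_toFinset, List.mem_toFinset]
    exact ⟨hx.1, fun h => hx.2 (Or.inr h)⟩
  · intro hsub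
    have := hsub hp
    rw [Finset.mem_sdiff, List.mem_toFinset, List.mem_toFinset, List.mem_cons] at this
    exact this.2 (Or.inl rfl)

lemma unv_append_new (maps : List String) :
    ∀ (added visit : List Cell), added.Nodup →
      (∀ a ∈ added, validCell maps [] a.1 a.2 = true ∧ a ∉ visit) →
      unv maps (added ++ visit) + added.length ≤ unv maps visit := by
  intro added
  induction added with
  | nil => intro visit _ _; simp
  | cons a rest ih =>
    intro visit hnd hprops
    have h1 : unv maps (a :: (rest ++ visit)) < unv maps (rest ++ visit) := by
      apply unv_cons_lt maps (hprops a (by simp)).1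
      intro hm
      rcases List.mem_append.1 hm with h | h
      · exact (List.nodup_cons.1 hnd).1 h
      · exact (hprops a (by simp)).2 h
    have h2 := ih visit (List.nodup_cons.1 hnd).2 (fun x hx => hprops x (by simp [hx]))
    simp only [List.cons_append, List.length_cons]
    omega

-- reachability through unvisited non-'X' cells -------------------------------

inductive Reach (maps : List String) (V : List Cell) (s : Cell) : Cell → Prop
  | refl : Reach maps V s s
  | step {p dv : Cell} : Reach maps V s p → dv ∈ dirs4 →
      validCell maps V (p.1 + dv.1) (p.2 + dv.2) = true →
      Reach maps V s (p.1 + dv.1, p.2 + dv.2)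

lemma reach_not_mem (maps : List String) {V : List Cell} {s : Cell} (hs : s ∉ V) :
    ∀ {t : Cell}, Reach maps V s t → t ∉ V := by
  intro t h
  induction h with
  | refl => exact hs
  | step _ _ hval _ => exact validCell_not_mem maps hval

lemma reach_congr (maps : List String) {V W : List Cell} (h : ∀ x, x ∈ V ↔ x ∈ W) {s t : Cell}
    (hr : Reach maps V s t) : Reach maps W s t := by
  induction hr with
  | refl => exact Reach.refl
  | step _ hdv hval ih =>
    exact Reach.step ih hdv (by rw [← validCell_congr maps h]; exact hval)

lemma reach_compose (maps : List String) {V W : List Cell} {s n : Cell}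
    (hsub : ∀ x ∈ V, x ∈ W) (hn : Reach maps V s n) :
    ∀ {t : Cell}, Reach maps W n t → Reach maps V s t := by
  intro t h
  induction h with
  | refl => exact hn
  | step _ hdv hval ih => exact Reach.step ih hdv (validCell_sub maps hsub hval)

lemma reach_complete (maps : List String) {V : List Cell} {s : Cell} (F : List Cell)
    (hsV : s ∉ V) (hsF : s ∈ F) (hVF : ∀ x ∈ V, x ∈ F)
    (hcl : ∀ p, p ∈ F → p ∉ V → ∀ dv ∈ dirs4,
      validCell maps F (p.1 + dv.1) (p.2 + dv.2) = false) :
    ∀ {t : Cell}, Reach maps V s t → t ∈ F := by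
  intro t h
  induction h with
  | refl => exact hsF
  | @step p dv hre hdv hval ih =>
    exact validCell_resolve maps hVF hval
      (hcl p ih (reach_not_mem maps hsV hre) dv hdv)

-- the common shape of one island traversal -----------------------------------

def NewSpec (maps : List String) (V : List Cell) (s : Cell) (out : List Cell × Int) : Prop :=
  ∃ D : List Cell,
    out = (D ++ V, (D.map (fun a => cellVal maps a.1 a.2)).sum) ∧ D.Nodup ∧
      (∀ p, p ∈ D ↔ Reach maps V s p)

lemma newSpec_congr (maps : List String) {VA VB : List Cell} (h : ∀ x, x ∈ VA ↔ x ∈ VB)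
    {s : Cell} {outA outB : List Cell × Int}
    (hA : NewSpec maps VA s outA) (hB : NewSpec maps VB s outB) :
    outA.2 = outB.2 ∧ ∀ x, x ∈ outA.1 ↔ x ∈ outB.1 := by
  obtain ⟨DA, hA1, hA2, hA3⟩ := hA
  obtain ⟨DB, hB1, hB2, hB3⟩ := hB
  have hmem : ∀ x, x ∈ DA ↔ x ∈ DB := by
    intro x
    rw [hA3, hB3]
    exact ⟨reach_congr maps h, reach_congr maps (fun x => (h x).symm)⟩
  have hperm : DA.Perm DB := (List.perm_ext_iff_of_nodup hA2 hB2).2 hmem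
  subst hA1; subst hB1
  refine ⟨(hperm.map _).sum_eq, fun x => ?_⟩
  simp only [List.mem_append]
  rw [hmem x, h x]

-- correctness of A's BFS -----------------------------------------------------

lemma bfs_fold (maps : List String) (cx cy : Int) :
    ∀ (ds : List Cell) (q visit : List Cell) (sum : Int),
      ∃ added : List Cell,
        ds.foldl (bfsStep maps cx cy) (q, visit, sum)
          = (q ++ added, added.reverse ++ visit,
              sum + (added.map (fun a => cellVal maps a.1 a.2)).sum) ∧
        added.Nodup ∧
        (∀ a ∈ added, validCell maps visit a.1 a.2 = true ∧
          ∃ dv ∈ ds, a = (cx + dv.1, cy + dv.2)) ∧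
        (∀ dv ∈ ds, validCell maps (added.reverse ++ visit) (cx + dv.1) (cy + dv.2) = false) := by
  intro ds
  induction ds with
  | nil =>
    intro q visit sum
    exact ⟨[], by simp, by simp, by simp, by simp⟩
  | cons d ds' ih =>
    intro q visit sum
    by_cases hv : validCell maps visit (cx + d.1) (cy + d.2) = true
    · -- neighbour is valid: it is appended, marked and summed
      set a : Cell := (cx + d.1, cy + d.2) with ha
      obtain ⟨rest, h1, h2, h3, h4⟩ :=
        ih (q ++ [a]) (a :: visit) (sum + cellVal maps a.1 a.2)
      refine ⟨a :: rest, ?_, ?_, ?_, ?_⟩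
      · simp only [List.foldl_cons, bfsStep, hv, if_pos]
        rw [h1]
        simp [List.append_assoc, add_assoc]
      · refine List.nodup_cons.2 ⟨fun hm => ?_, h2⟩
        exact ((h3 a hm).1 |> validCell_not_mem maps) (by simp)
      · intro x hx
        rcases List.mem_cons.1 hx with rfl | hx
        · exact ⟨hv, d, by simp, rfl⟩
        · obtain ⟨hxv, dv, hdv, hxe⟩ := h3 x hx
          exact ⟨validCell_sub maps (by intro y hy; simp [hy]) hxv, dv, by simp [hdv], hxe⟩
      · intro dv hdv
        rcases List.mem_cons.1 hdv with rfl | hdv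
        · apply validCell_false_of_mem
          rw [← ha]
          simp
        · have := h4 dv hdv
          simp only [List.reverse_cons, List.append_assoc, List.singleton_append] at this ⊢
          exact this
    · -- neighbour invalid: state unchanged
      rw [Bool.not_eq_true] at hv
      obtain ⟨rest, h1, h2, h3, h4⟩ := ih q visit sum
      refine ⟨rest, ?_, h2, ?_, ?_⟩
      · simp only [List.foldl_cons, bfsStep, hv]
        simpa using h1
      · intro x hx
        obtain ⟨hxv, dv, hdv, hxe⟩ := h3 x hx
        exact ⟨hxv, dv, by simp [hdv], hxe⟩
      · intro dv hdv
        rcases List.mem_cons.1 hdv with rfl | hdv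
        · apply validCell_false_sub maps (by intro y hy; simp [hy]) hv
        · exact h4 dv hdv


lemma bfsLoop_run (maps : List String) (V : List Cell) (s : Cell)
    (_hs : validCell maps V s.1 s.2 = true) :
    ∀ (fuel : Nat) (q visit : List Cell) (sum : Int),
      q.length + unv maps visit < fuel →
      (∀ p ∈ q, p ∈ visit ∧ p ∉ V ∧ Reach maps V s p) →
      (∀ x ∈ V, x ∈ visit) →
      (∀ p ∈ visit, p ∉ V → Reach maps V s p) →
      s ∈ visit →
      (∀ p, p ∈ visit → p ∉ V → p ∉ q → ∀ dv ∈ dirs4,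
        validCell maps visit (p.1 + dv.1) (p.2 + dv.2) = false) →
      ∃ D : List Cell,
        bfsLoop maps fuel q visit sum
          = (D ++ visit, sum + (D.map (fun a => cellVal maps a.1 a.2)).sum) ∧
        D.Nodup ∧ (∀ p ∈ D, p ∉ visit ∧ Reach maps V s p) ∧
        (∀ p, (p ∈ D ∨ p ∈ visit) → p ∉ V → ∀ dv ∈ dirs4,
          validCell maps (D ++ visit) (p.1 + dv.1) (p.2 + dv.2) = false) := by
  intro fuel
  induction fuel with
  | zero => intro q visit sum hmeas; exact absurd hmeas (Nat.not_lt_zero _)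
  | succ fuel ih =>
    intro q visit sum hmeas hq hVv hvR hsv hcl
    cases q with
    | nil =>
      refine ⟨[], by simp [bfsLoop], by simp, by simp, ?_⟩
      intro p hp hpV dv hdv
      rcases hp with hp | hp
      · exact absurd hp (by simp)
      · simpa using hcl p hp hpV (by simp) dv hdv
    | cons c qrest =>
      obtain ⟨hcv, hcV, hcR⟩ := hq c (by simp)
      obtain ⟨added, hfold, hnd, hprops, hclose⟩ := bfs_fold maps c.1 c.2 dirs4 qrest visit sum
      have hVsub : ∀ x ∈ V, x ∈ visit := hVv
      have haddV : ∀ a ∈ added, a ∉ visit ∧ a ∉ V ∧ Reach maps V s a := by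
        intro a ha
        obtain ⟨hav, dv, hdv, hae⟩ := hprops a ha
        have hnm : a ∉ visit := validCell_not_mem maps (by rw [hae] at hav ⊢; exact hav)
        refine ⟨hnm, fun hm => hnm (hVsub a hm), ?_⟩
        rw [hae]
        exact Reach.step hcR hdv (validCell_sub maps hVsub (by rw [hae] at hav; exact hav))
      have hmeas' : (qrest ++ added).length + unv maps (added.reverse ++ visit) < fuel := by
        have hle := unv_append_new maps added.reverse visit (List.nodup_reverse.2 hnd) (by
          intro a ha
          rw [List.mem_reverse] at ha
          obtain ⟨hav, _, _, _⟩ := hprops a ha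
          exact ⟨validCell_static maps (by
            obtain ⟨h1, dv, hdv, hae⟩ := hprops a ha
            rw [hae] at h1 ⊢; exact h1), (haddV a ha).1⟩)
        simp only [List.length_append, List.length_reverse] at hle ⊢
        simp only [List.length_cons] at hmeas
        omega
      have hmemv' : ∀ x ∈ visit, x ∈ added.reverse ++ visit := by
        intro x hx; simp [hx]
      have hmema' : ∀ x ∈ added, x ∈ added.reverse ++ visit := by
        intro x hx; simp [hx]
      obtain ⟨Drec, hres, hndD, hDp, hDcl⟩ := ih (qrest ++ added) (added.reverse ++ visit)
        (sum + (added.map (fun a => cellVal maps a.1 a.2)).sum) hmeas'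
        (by
          intro p hp
          rcases List.mem_append.1 hp with hp | hp
          · obtain ⟨h1, h2, h3⟩ := hq p (by simp [hp])
            exact ⟨hmemv' p h1, h2, h3⟩
          · obtain ⟨h1, h2, h3⟩ := haddV p hp
            exact ⟨hmema' p hp, h2, h3⟩)
        (fun x hx => hmemv' x (hVv x hx))
        (by
          intro p hp hpV
          rcases List.mem_append.1 hp with hp | hp
          · exact (haddV p (List.mem_reverse.1 hp)).2.2
          · exact hvR p hp hpV)
        (hmemv' s hsv)
        (by
          intro p hp hpV hpq dv hdv
          rcases List.mem_append.1 hp with hp | hp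
          · exact absurd (by simp [List.mem_reverse.1 hp] : p ∈ qrest ++ added) hpq
          · by_cases hpc : p = c
            · subst hpc; exact hclose dv hdv
            · exact validCell_false_sub maps hmemv'
                (hcl p hp hpV (by
                  simp only [List.mem_cons, not_or]
                  exact ⟨hpc, fun h => hpq (by simp [h])⟩) dv hdv))
      refine ⟨Drec ++ added.reverse, ?_, ?_, ?_, ?_⟩
      · show bfsLoop maps (fuel + 1) (c :: qrest) visit sum = _
        rw [bfsLoop]
        rw [hfold]
        rw [hres]
        simp [List.append_assoc, List.sum_append]
        omega
      · rw [List.nodup_append]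
        refine ⟨hndD, (List.nodup_reverse.2 hnd), ?_⟩
        intro x hx y hy heq
        subst heq
        exact (hDp x hx).1 (hmema' x (List.mem_reverse.1 hy))
      · intro p hp
        rcases List.mem_append.1 hp with hp | hp
        · obtain ⟨h1, h2⟩ := hDp p hp
          exact ⟨fun hm => h1 (hmemv' p hm), h2⟩
        · obtain ⟨h1, _, h3⟩ := haddV p (List.mem_reverse.1 hp)
          exact ⟨h1, h3⟩
      · intro p hp hpV dv hdv
        have : p ∈ Drec ∨ p ∈ added.reverse ++ visit := by
          rcases hp with hp | hp
          · rcases List.mem_append.1 hp with hp | hp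
            · exact Or.inl hp
            · exact Or.inr (by simp [hp])
          · exact Or.inr (hmemv' p hp)
        have := hDcl p this hpV dv hdv
        rw [List.append_assoc]
        exact this


lemma bfsA_spec (maps : List String) (V : List Cell) (i j : Int)
    (hval : validCell maps V i j = true) :
    NewSpec maps V (i, j) (bfsA maps i j V) := by
  have hsV : (i, j) ∉ V := validCell_not_mem maps hval
  have hstat : validCell maps [] i j = true := validCell_static maps hval
  have hcons : unv maps ((i, j) :: V) < unv maps V := unv_cons_lt maps hstat hsV
  have htot := unv_le_total maps V
  obtain ⟨D, hres, hnd, hDp, hDcl⟩ := bfsLoop_run maps V (i, j) hval (gridFuel maps)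
    [(i, j)] ((i, j) :: V) (cellVal maps i j)
    (by simp only [List.length_cons, List.length_nil, gridFuel]; omega)
    (by
      intro p hp
      simp only [List.mem_singleton] at hp
      subst hp
      exact ⟨by simp, hsV, Reach.refl⟩)
    (fun x hx => by simp [hx])
    (by
      intro p hp hpV
      rcases List.mem_cons.1 hp with rfl | hp
      · exact Reach.refl
      · exact absurd hp hpV)
    (by simp)
    (by
      intro p hp hpV hpq
      exfalso
      rcases List.mem_cons.1 hp with rfl | hp
      · exact hpq (by simp)
      · exact hpV hp)
  have hsD : ∀ p ∈ D, p ∉ (i, j) :: V ∧ Reach maps V (i, j) p := hDp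
  refine ⟨D ++ [(i, j)], ?_, ?_, ?_⟩
  · show bfsLoop maps (gridFuel maps) [(i, j)] ((i, j) :: V) (cellVal maps i j) = _
    rw [hres]
    refine Prod.ext ?_ ?_
    · simp
    · simp only [List.map_append, List.sum_append, List.map_cons, List.map_nil, List.sum_cons,
        List.sum_nil]
      omega
  · rw [List.nodup_append]
    refine ⟨hnd, by simp, ?_⟩
    intro x hx y hy heq
    subst heq
    simp only [List.mem_singleton] at hy
    exact (hsD x hx).1 (by simp [hy])
  · intro p
    constructor
    · intro hp
      rcases List.mem_append.1 hp with hp | hp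
      · exact (hsD p hp).2
      · simp only [List.mem_singleton] at hp
        subst hp
        exact Reach.refl
    · intro hr
      have hpF : p ∈ D ++ (i, j) :: V := by
        refine reach_complete maps (D ++ (i, j) :: V) hsV (by simp) (fun x hx => by simp [hx])
          ?_ hr
        intro x hx hxV dv hdv
        apply hDcl x _ hxV dv hdv
        rcases List.mem_append.1 hx with hx | hx
        · exact Or.inl hx
        · exact Or.inr hx
      have hpV : p ∉ V := reach_not_mem maps hsV hr
      rcases List.mem_append.1 hpF with hp | hp
      · simp [hp]
      · rcases List.mem_cons.1 hp with rfl | hp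
        · simp
        · exact absurd hp hpV

-- correctness of B's flood fill ----------------------------------------------

lemma flood_spec (maps : List String) :
    ∀ (fuel : Nat) (i j : Int) (W : List Cell),
      validCell maps W i j = true → unv maps W < fuel →
      ∃ D : List Cell,
        floodB maps fuel i j W
          = (D ++ W, (D.map (fun a => cellVal maps a.1 a.2)).sum) ∧
        (i, j) ∈ D ∧ D.Nodup ∧ (∀ p ∈ D, p ∉ W ∧ Reach maps W (i, j) p) ∧
        (∀ p ∈ D, ∀ dv ∈ dirs4,
          validCell maps (D ++ W) (p.1 + dv.1) (p.2 + dv.2) = false) := by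
  intro fuel
  induction fuel with
  | zero => intro i j W _ hf; exact absurd hf (Nat.not_lt_zero _)
  | succ fuel ih =>
    intro i j W hval hfuel
    have hsW : (i, j) ∉ W := validCell_not_mem maps hval
    have hstat : validCell maps [] i j = true := validCell_static maps hval
    -- the inner fold over the direction list
    have fold : ∀ (ds : List Cell), (∀ d ∈ ds, d ∈ dirs4) → ∀ (Wc : List Cell) (t : Int),
        (∀ x ∈ W, x ∈ Wc) → (∀ p ∈ Wc, p ∉ W → Reach maps W (i, j) p) →
        unv maps Wc < fuel →
        ∃ D2 : List Cell,
          ds.foldl (fun (st : List Cell × Int) dv =>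
            if validCell maps st.1 (i + dv.1) (j + dv.2) then
              let r := floodB maps fuel (i + dv.1) (j + dv.2) st.1
              (r.1, st.2 + r.2)
            else st) (Wc, t)
            = (D2 ++ Wc, t + (D2.map (fun a => cellVal maps a.1 a.2)).sum) ∧
          D2.Nodup ∧ (∀ p ∈ D2, p ∉ Wc ∧ Reach maps W (i, j) p) ∧
          (∀ d ∈ ds, validCell maps (D2 ++ Wc) (i + d.1) (j + d.2) = false) ∧
          (∀ p ∈ D2, ∀ dv ∈ dirs4,
            validCell maps (D2 ++ Wc) (p.1 + dv.1) (p.2 + dv.2) = false) := by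
      intro ds
      induction ds with
      | nil =>
        intro _ Wc t _ _ _
        exact ⟨[], by simp, by simp, by simp, by simp, by simp⟩
      | cons d ds' ihds =>
        intro hds Wc t hWWc hWcR hWcu
        have hd4 : d ∈ dirs4 := hds d (by simp)
        by_cases hv : validCell maps Wc (i + d.1) (j + d.2) = true
        · obtain ⟨Dr, hr1, hr2, hr3, hr4, hr5⟩ := ih (i + d.1) (j + d.2) Wc hv hWcu
          have hreachn : Reach maps W (i, j) (i + d.1, j + d.2) :=
            Reach.step Reach.refl hd4 (validCell_sub maps hWWc hv)
          have hDrR : ∀ p ∈ Dr, Reach maps W (i, j) p := by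
            intro p hp
            exact reach_compose maps hWWc hreachn ((hr4 p hp).2)
          obtain ⟨D2', h1, h2, h3, h4, h5⟩ := ihds (fun x hx => hds x (by simp [hx]))
            (Dr ++ Wc) (t + (Dr.map (fun a => cellVal maps a.1 a.2)).sum)
            (fun x hx => by simp [hWWc x hx])
            (by
              intro p hp hpW
              rcases List.mem_append.1 hp with hp | hp
              · exact hDrR p hp
              · exact hWcR p hp hpW)
            ((unv_anti maps (fun x hx => List.mem_append_right Dr hx)).trans_lt hWcu)
          refine ⟨D2' ++ Dr, ?_, ?_, ?_, ?_, ?_⟩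
          · simp only [List.foldl_cons, hv, if_pos]
            rw [hr1]
            simp only at h1
            rw [h1]
            refine Prod.ext ?_ ?_
            · simp [List.append_assoc]
            · simp only [List.map_append, List.sum_append]
              omega
          · rw [List.nodup_append]
            refine ⟨h2, hr3, ?_⟩
            intro x hx y hy heq
            subst heq
            exact (h3 x hx).1 (by simp [hy])
          · intro p hp
            rcases List.mem_append.1 hp with hp | hp
            · exact ⟨fun hm => (h3 p hp).1 (by simp [hm]), (h3 p hp).2⟩
            · exact ⟨(hr4 p hp).1, hDrR p hp⟩
          · intro d' hd'
            rcases List.mem_cons.1 hd' with rfl | hd'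
            · apply validCell_false_of_mem
              simp only [List.append_assoc, List.mem_append]
              exact Or.inr (Or.inl (hr2))
            · have := h4 d' hd'
              rw [List.append_assoc]
              exact this
          · intro p hp dv hdv
            rw [List.append_assoc]
            rcases List.mem_append.1 hp with hp | hp
            · exact h5 p hp dv hdv
            · exact validCell_false_sub maps
                (by intro x hx; rcases List.mem_append.1 hx with hx | hx <;> simp [hx])
                (hr5 p hp dv hdv)
        · rw [Bool.not_eq_true] at hv
          obtain ⟨D2, h1, h2, h3, h4, h5⟩ := ihds (fun x hx => hds x (by simp [hx])) Wc t
            hWWc hWcR hWcu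
          refine ⟨D2, by simp only [List.foldl_cons, hv, Bool.false_eq_true, if_false]; exact h1,
            h2, h3, ?_, h5⟩
          intro d' hd'
          rcases List.mem_cons.1 hd' with rfl | hd'
          · exact validCell_false_sub maps (fun x hx => by simp [hx]) hv
          · exact h4 d' hd'
    have hWcu : unv maps ((i, j) :: W) < fuel := by
      have := unv_cons_lt maps hstat hsW
      omega
    obtain ⟨D2, h1, h2, h3, h4, h5⟩ := fold dirs4 (fun d hd => hd) ((i, j) :: W)
      (cellVal maps i j) (fun x hx => by simp [hx])
      (by
        intro p hp hpW
        rcases List.mem_cons.1 hp with rfl | hp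
        · exact Reach.refl
        · exact absurd hp hpW)
      hWcu
    refine ⟨D2 ++ [(i, j)], ?_, by simp, ?_, ?_, ?_⟩
    · show dirs4.foldl _ ((i, j) :: W, cellVal maps i j) = _
      rw [h1]
      refine Prod.ext (by simp) ?_
      simp only [List.map_append, List.sum_append, List.map_cons, List.map_nil, List.sum_cons,
        List.sum_nil]
      omega
    · rw [List.nodup_append]
      refine ⟨h2, by simp, ?_⟩
      intro x hx y hy heq
      subst heq
      simp only [List.mem_singleton] at hy
      exact (h3 x hx).1 (by simp [hy])
    · intro p hp
      rcases List.mem_append.1 hp with hp | hp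
      · exact ⟨fun hm => (h3 p hp).1 (by simp [hm]), (h3 p hp).2⟩
      · simp only [List.mem_singleton] at hp
        subst hp
        exact ⟨hsW, Reach.refl⟩
    · intro p hp dv hdv
      have hF : D2 ++ [(i, j)] ++ W = D2 ++ (i, j) :: W := by simp
      rw [hF]
      rcases List.mem_append.1 hp with hp | hp
      · exact h5 p hp dv hdv
      · simp only [List.mem_singleton] at hp
        subst hp
        exact h4 dv hdv

lemma floodB_spec (maps : List String) (V : List Cell) (i j : Int)
    (hval : validCell maps V i j = true) (hfuel : unv maps V < gridFuel maps) :
    NewSpec maps V (i, j) (floodB maps (gridFuel maps) i j V) := by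
  have hsV : (i, j) ∉ V := validCell_not_mem maps hval
  obtain ⟨D, h1, h2, h3, h4, h5⟩ := flood_spec maps (gridFuel maps) i j V hval hfuel
  refine ⟨D, h1, h3, ?_⟩
  intro p
  constructor
  · intro hp
    exact (h4 p hp).2
  · intro hr
    have hpF : p ∈ D ++ V := by
      refine reach_complete maps (D ++ V) hsV (by simp [h2]) (fun x hx => by simp [hx]) ?_ hr
      intro x hx hxV dv hdv
      rcases List.mem_append.1 hx with hx | hx
      · exact h5 x hx dv hdv
      · exact absurd hx hxV
    rcases List.mem_append.1 hpF with hp | hp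
    · exact hp
    · exact absurd hp (reach_not_mem maps hsV hr)

-- the outer double loop ------------------------------------------------------

lemma step_rel (maps : List String) (i j : Int)
    (hi : 0 ≤ i ∧ i < (maps.length : Int))
    (hj : 0 ≤ j ∧ j < ((maps.headD "").length : Int))
    (stA stB : List Cell × List Int) (h2 : stA.2 = stB.2)
    (h1 : ∀ x, x ∈ stA.1 ↔ x ∈ stB.1) :
    ((if validCell maps stA.1 i j then
        let r := bfsA maps i j stA.1
        (r.1, stA.2 ++ [r.2])
      else stA)).2
      = ((if !(decide ((i, j) ∈ stB.1)) && decide (cellAt maps i j ≠ 'X') then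
        let r := floodB maps (gridFuel maps) i j stB.1
        (r.1, stB.2 ++ [r.2])
      else stB)).2
    ∧ (∀ x, x ∈ ((if validCell maps stA.1 i j then
        let r := bfsA maps i j stA.1
        (r.1, stA.2 ++ [r.2])
      else stA)).1 ↔ x ∈ ((if !(decide ((i, j) ∈ stB.1)) && decide (cellAt maps i j ≠ 'X') then
        let r := floodB maps (gridFuel maps) i j stB.1
        (r.1, stB.2 ++ [r.2])
      else stB)).1) := by
  by_cases hA : validCell maps stA.1 i j = true
  · have hparts := (validCell_iff maps stA.1 i j).1 hA
    have hB : (!(decide ((i, j) ∈ stB.1)) && decide (cellAt maps i j ≠ 'X')) = true := by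
      simp only [Bool.and_eq_true, Bool.not_eq_true', decide_eq_false_iff_not,
        decide_eq_true_eq]
      exact ⟨fun hm => hparts.2.2.2.2.1 ((h1 (i, j)).2 hm), hparts.2.2.2.2.2⟩
    have hvalB : validCell maps stB.1 i j = true := by
      rw [← validCell_congr maps h1 i j]; exact hA
    have hfuel : unv maps stB.1 < gridFuel maps := by
      unfold gridFuel
      exact Nat.lt_succ_of_le (unv_le_total maps stB.1)
    obtain ⟨hsum, hmem⟩ := newSpec_congr maps h1 (bfsA_spec maps stA.1 i j hA)
      (floodB_spec maps stB.1 i j hvalB hfuel)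
    rw [if_pos hA, if_pos hB]
    refine ⟨?_, ?_⟩
    · show stA.2 ++ [(bfsA maps i j stA.1).2]
        = stB.2 ++ [(floodB maps (gridFuel maps) i j stB.1).2]
      rw [h2, hsum]
    · intro x
      show x ∈ (bfsA maps i j stA.1).1 ↔ x ∈ (floodB maps (gridFuel maps) i j stB.1).1
      exact hmem x
  · have hB : (!(decide ((i, j) ∈ stB.1)) && decide (cellAt maps i j ≠ 'X')) = false := by
      rw [validCell_iff] at hA
      simp only [Bool.and_eq_false_iff, Bool.not_eq_false', decide_eq_true_iff,
        decide_eq_false_iff_not, Decidable.not_not]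
      by_cases hm : (i, j) ∈ stB.1
      · exact Or.inl hm
      · by_cases hX : cellAt maps i j = 'X'
        · exact Or.inr hX
        · exact absurd ⟨hi.1, hi.2, hj.1, hj.2, fun hmA => hm ((h1 (i, j)).1 hmA), hX⟩ hA
    rw [if_neg hA, hB]
    exact ⟨h2, by simp [h1]⟩

lemma inner_fold_rel (maps : List String) (i : Int)
    (hi : 0 ≤ i ∧ i < (maps.length : Int)) :
    ∀ (js : List Int), (∀ j ∈ js, 0 ≤ j ∧ j < ((maps.headD "").length : Int)) →
      ∀ (stA stB : List Cell × List Int), stA.2 = stB.2 → (∀ x, x ∈ stA.1 ↔ x ∈ stB.1) →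
      (js.foldl (fun (st : List Cell × List Int) j =>
          if validCell maps st.1 i j then
            let r := bfsA maps i j st.1
            (r.1, st.2 ++ [r.2])
          else st) stA).2
        = (js.foldl (fun (st : List Cell × List Int) j =>
          if !(decide ((i, j) ∈ st.1)) && decide (cellAt maps i j ≠ 'X') then
            let r := floodB maps (gridFuel maps) i j st.1
            (r.1, st.2 ++ [r.2])
          else st) stB).2
      ∧ (∀ x, x ∈ (js.foldl (fun (st : List Cell × List Int) j =>
          if validCell maps st.1 i j then
            let r := bfsA maps i j st.1
            (r.1, st.2 ++ [r.2])
          else st) stA).1 ↔ x ∈ (js.foldl (fun (st : List Cell × List Int) j =>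
          if !(decide ((i, j) ∈ st.1)) && decide (cellAt maps i j ≠ 'X') then
            let r := floodB maps (gridFuel maps) i j st.1
            (r.1, st.2 ++ [r.2])
          else st) stB).1) := by
  intro js
  induction js with
  | nil => intro _ stA stB h2 h1; exact ⟨h2, h1⟩
  | cons j js' ihjs =>
    intro hjs stA stB h2 h1
    obtain ⟨h2', h1'⟩ := step_rel maps i j hi (hjs j (by simp)) stA stB h2 h1
    simp only [List.foldl_cons]
    exact ihjs (fun x hx => hjs x (by simp [hx])) _ _ h2' h1'

lemma outer_fold_rel (maps : List String) :
    ∀ (is_ : List Int), (∀ i ∈ is_, 0 ≤ i ∧ i < (maps.length : Int)) →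
      ∀ (stA stB : List Cell × List Int), stA.2 = stB.2 → (∀ x, x ∈ stA.1 ↔ x ∈ stB.1) →
      (is_.foldl (fun st i =>
          (PySem.List.pyRange 0 ((maps.headD "").length : Int) 1).foldl
            (fun (st : List Cell × List Int) j =>
              if validCell maps st.1 i j then
                let r := bfsA maps i j st.1
                (r.1, st.2 ++ [r.2])
              else st) st) stA).2
        = (is_.foldl (fun st i =>
          (PySem.List.pyRange 0 ((maps.headD "").length : Int) 1).foldl
            (fun (st : List Cell × List Int) j =>
              if !(decide ((i, j) ∈ st.1)) && decide (cellAt maps i j ≠ 'X') then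
                let r := floodB maps (gridFuel maps) i j st.1
                (r.1, st.2 ++ [r.2])
              else st) st) stB).2 := by
  intro is_
  induction is_ with
  | nil => intro _ stA stB h2 _; exact h2
  | cons i is' ihis =>
    intro his stA stB h2 h1
    obtain ⟨h2', h1'⟩ := inner_fold_rel maps i (his i (by simp))
      (PySem.List.pyRange 0 ((maps.headD "").length : Int) 1)
      (by intro j hj; exact (PySem.List.mem_pyRange_one.1 hj))
      stA stB h2 h1
    simp only [List.foldl_cons]
    exact ihis (fun x hx => his x (by simp [hx])) _ _ h2' h1'

lemma final_if (l : List Int) :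
    (if l.length > 0 then l else [-1]) = (if l ≠ [] then l else [-1]) := by
  cases l <;> simp

-- ===== VERDICT (by name: the statement is the Claim_ definition above) =====
theorem solution_spec : Claim_equal_solution := by
  intro maps _ _
  show solution maps = solution_alt maps
  have hres := outer_fold_rel maps (PySem.List.pyRange 0 (maps.length : Int) 1)
    (by intro i hi; exact (PySem.List.mem_pyRange_one.1 hi))
    ([], []) ([], []) rfl (fun x => Iff.rfl)
  simp only [solution, solution_alt]
  rw [hres]
  exact final_if _
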